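-- pv_equiv track=rewrite | github.com/shugewang/advent_of_code_2021 | day4.py | convert_to_bingo_dict
-- ===== SOURCE A (Python) =====
-- def convert_to_bingo_dict(bingo):
--     count = 0
--     board_number = 1
--     bingo_dict = {board_number: []}
--     for x in bingo:
--         if x != '':
--             if count != 0 and count % 5 == 0:
--                 count = 0
--                 board_number += 1
--                 bingo_dict[board_number] = [x]
--             else:
--                 bingo_dict[board_number].append(x)
--             count += 1
--     return bingo_dict
-- ===== SOURCE B (Python) =====
-- def convert_to_bingo_dict(bingo):
--     tokens = [x for x in bingo if x != '']
--     bingo_dict = {1: []}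
--     i = 0
--     n = 1
--     while i < len(tokens):
--         bingo_dict[n] = tokens[i:i+5]
--         i += 5
--         n += 1
--     return bingo_dict
-- ===== Notes on version B (the rewrite author's own statement) =====
-- stated objective: simpler
-- what changed: Replaces A's per-token count/board-number state machine that appends one element at a time into the dict lists with a single filter pass followed by slicing the token list into 5-element chunks by index, one dict assignment per board.
import Mathlib
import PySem

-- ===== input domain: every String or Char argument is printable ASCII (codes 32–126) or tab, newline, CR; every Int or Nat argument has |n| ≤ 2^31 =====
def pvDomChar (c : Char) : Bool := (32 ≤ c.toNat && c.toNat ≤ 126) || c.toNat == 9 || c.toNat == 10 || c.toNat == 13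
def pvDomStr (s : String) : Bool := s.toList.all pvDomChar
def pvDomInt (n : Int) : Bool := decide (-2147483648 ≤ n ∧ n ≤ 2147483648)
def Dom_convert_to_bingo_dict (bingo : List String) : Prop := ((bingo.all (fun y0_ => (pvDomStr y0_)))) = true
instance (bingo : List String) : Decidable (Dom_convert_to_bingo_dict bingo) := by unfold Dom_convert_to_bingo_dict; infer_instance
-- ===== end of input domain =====

-- B replaces A's per-token count/board state machine by one filter pass plus slicing the
-- token list into 5-element chunks, one dict assignment per board (objective: simpler).

-- ===== PORT A =====
-- A's loop body: skip '', start a new board when count is a positive multiple of 5,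
-- otherwise append to the current board (bingo_dict[board].append(x) stores the extended
-- list back at the same key; PySem.Dict.insert overwrites in place).
def pvAstep (st : Int × Int × PySem.Dict Int (List String)) (x : String) :
    Int × Int × PySem.Dict Int (List String) :=
  if x ≠ "" then
    if st.1 ≠ 0 ∧ PySem.Int.mod st.1 5 = 0 then
      (1, st.2.1 + 1, st.2.2.insert (st.2.1 + 1) [x])
    else
      (st.1 + 1, st.2.1, st.2.2.insert st.2.1 (st.2.2.getD st.2.1 [] ++ [x]))
  else st

def convert_to_bingo_dict (bingo : List String) : List (Int × List String) :=
  (bingo.foldl pvAstep (0, 1, (PySem.Dict.empty.insert 1 []))).2.2.items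

-- ===== PORT B =====
-- B's while loop: assign tokens[i:i+5] to key n, advance i by 5.
def pvBChunks (ts : List String) (i n : Int) (d : PySem.Dict Int (List String)) :
    PySem.Dict Int (List String) :=
  if i < (ts.length : Int) then
    pvBChunks ts (i + 5) (n + 1) (d.insert n (PySem.List.slice ts (some i) (some (i + 5))))
  else d
termination_by ((ts.length : Int) - i).toNat
decreasing_by omega

def convert_to_bingo_dict_alt (bingo : List String) : List (Int × List String) :=
  (pvBChunks (bingo.filter (fun x => x != "")) 0 1 (PySem.Dict.empty.insert 1 [])).items

-- ===== PRECONDITION & SPEC =====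
def Spec_convert_to_bingo_dict (bingo : List String) (out : List (Int × List String)) : Prop := out = convert_to_bingo_dict_alt bingo
instance (bingo : List String) (out : List (Int × List String)) : Decidable (Spec_convert_to_bingo_dict bingo out) := by unfold Spec_convert_to_bingo_dict; infer_instance

-- ===== CLAIM (what is proved, stated in full; the proofs are below) =====
def Claim_equal_convert_to_bingo_dict : Prop := ∀ (bingo : List String), Dom_convert_to_bingo_dict bingo → Spec_convert_to_bingo_dict bingo (convert_to_bingo_dict bingo)

-- ===== LEMMAS AND PROOFS =====

-- canonical form of A's loop result: current partial board `cur`, then boards cut from ts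
def boardsA (cur : List String) (k : Int) (ts : List String) : List (Int × List String) :=
  match ts with
  | [] => [(k, cur)]
  | x :: r => if cur.length = 5 then (k, cur) :: boardsA [x] (k + 1) r else boardsA (cur ++ [x]) k r

-- canonical form of B's loop result: chunks of 5 numbered from k
def boardsB (ts : List String) (k : Int) : List (Int × List String) :=
  match ts with
  | [] => []
  | x :: r => (k, (x :: r).take 5) :: boardsB ((x :: r).drop 5) (k + 1)
termination_by ts.length
decreasing_by simp

lemma boardsB_ne (ts : List String) (k : Int) (h : ts ≠ []) :
    boardsB ts k = (k, ts.take 5) :: boardsB (ts.drop 5) (k + 1) := by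
  cases ts with
  | nil => exact absurd rfl h
  | cons x r => simp only [boardsB]

lemma foldl_pvAstep_filter (l : List String) (s : Int × Int × PySem.Dict Int (List String)) :
    l.foldl pvAstep s = (l.filter (fun x => x != "")).foldl pvAstep s := by
  induction l generalizing s with
  | nil => rfl
  | cons x r ih =>
      by_cases hx : x = ""
      · subst hx
        simpa [pvAstep] using ih s
      · simp [hx, List.foldl_cons, ih]

lemma empty_insert_eq_mk :
    (PySem.Dict.empty.insert (1:Int) ([]:List String)) = PySem.Dict.mk [(1, [])] := by
  decide

lemma loopA (ts : List String) (done : List (Int × List String)) (cur : List String)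
    (board : Int)
    (hts : ∀ x ∈ ts, x ≠ "") (hlen : cur.length ≤ 5)
    (hlt : ∀ p ∈ done, p.1 < board) (hnd : (done.map Prod.fst).Nodup) :
    (ts.foldl pvAstep ((cur.length : Int), board, PySem.Dict.mk (done ++ [(board, cur)]))).2.2.items
      = done ++ boardsA cur board ts := by
  induction ts generalizing done cur board with
  | nil => simp [boardsA]
  | cons x r ih =>
      have hx : x ≠ "" := hts x (by simp)
      have hts' : ∀ y ∈ r, y ≠ "" := fun y hy => hts y (by simp [hy])
      by_cases h5 : cur.length = 5
      · -- count is 5: start a new board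
        have hcond : ((cur.length : Int) ≠ 0 ∧ PySem.Int.mod (cur.length : Int) 5 = 0) := by
          rw [h5]; exact ⟨by norm_num, by decide⟩
        have hnc : (PySem.Dict.mk (done ++ [(board, cur)])).contains (board + 1) = false := by
          rw [PySem.Dict.contains_eq_decide_mem_keys]
          simp only [PySem.Dict.keys, decide_eq_false_iff_not, List.map_append, List.mem_append]
          rintro (hmem | hmem)
          · obtain ⟨p, hp, hpe⟩ := List.mem_map.mp hmem
            have := hlt p hp; omega
          · simp at hmem
        have hins : (PySem.Dict.mk (done ++ [(board, cur)])).insert (board + 1) [x]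
            = PySem.Dict.mk ((done ++ [(board, cur)]) ++ [(board + 1, [x])]) := by
          apply PySem.Dict.ext
          rw [PySem.Dict.items_insert_of_not_contains _ _ hnc]
        have ih' := ih (done ++ [(board, cur)]) [x] (board + 1) hts'
          (by simp)
          (by intro p hp
              rcases List.mem_append.mp hp with h | h
              · have := hlt p h; omega
              · simp at h; simp [h])
          (by rw [List.map_append]
              apply List.Nodup.append hnd (by simp)
              intro a ha hb
              obtain ⟨p, hp, hpe⟩ := List.mem_map.mp ha
              simp at hb
              subst hb
              have := hlt p hp; omega)
        have ih'' : (r.foldl pvAstep ((1:Int), board + 1,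
            PySem.Dict.mk ((done ++ [(board, cur)]) ++ [(board + 1, [x])]))).2.2.items
            = (done ++ [(board, cur)]) ++ boardsA [x] (board + 1) r := by
          simpa using ih'
        simp only [List.foldl_cons, pvAstep, if_pos hx, if_pos hcond]
        rw [hins, ih'']
        simp [boardsA, h5]
      · -- count below 5: append to current board
        have hcond : ¬ ((cur.length : Int) ≠ 0 ∧ PySem.Int.mod (cur.length : Int) 5 = 0) := by
          rintro ⟨hne, hmod⟩
          rw [PySem.Int.mod_eq_emod_of_pos (by norm_num : (0:Int) < 5)] at hmod
          omega
        have hknd : (PySem.Dict.mk (done ++ [(board, cur)])).keys.Nodup := by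
          simp only [PySem.Dict.keys, List.map_append]
          apply List.Nodup.append hnd (by simp)
          intro a ha hb
          obtain ⟨p, hp, hpe⟩ := List.mem_map.mp ha
          simp at hb
          subst hb
          have := hlt p hp; omega
        have hmem : ((board, cur) : Int × List String) ∈ (PySem.Dict.mk (done ++ [(board, cur)])).items := by
          simp
        have hget : (PySem.Dict.mk (done ++ [(board, cur)])).getD board [] = cur :=
          PySem.Dict.getD_of_mem_items _ hmem hknd []
        have hc : (PySem.Dict.mk (done ++ [(board, cur)])).contains board = true := by
          rw [PySem.Dict.contains_eq_decide_mem_keys]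
          simp [PySem.Dict.keys]
        have hins : (PySem.Dict.mk (done ++ [(board, cur)])).insert board (cur ++ [x])
            = PySem.Dict.mk (done ++ [(board, cur ++ [x])]) := by
          apply PySem.Dict.ext
          rw [PySem.Dict.items_insert_of_contains _ _ hc]
          simp only [List.map_append]
          congr 1
          · conv_rhs => rw [← List.map_id done]
            apply List.map_congr_left
            intro p hp
            have : p.1 < board := hlt p hp
            have : (p.1 == board) = false := by simp; omega
            simp [this]
          · simp
        have ih' := ih done (cur ++ [x]) board hts' (by simp; omega) hlt hnd
        have ih'' : (r.foldl pvAstep ((cur.length : Int) + 1, board,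
            PySem.Dict.mk (done ++ [(board, cur ++ [x])]))).2.2.items
            = done ++ boardsA (cur ++ [x]) board r := by
          have hc1 : (((cur ++ [x]).length : Nat) : Int) = (cur.length : Int) + 1 := by
            simp
          rw [hc1] at ih'
          exact ih'
        simp only [List.foldl_cons, pvAstep, if_pos hx, if_neg hcond]
        rw [hget, hins, ih'']
        simp [boardsA, h5]

lemma loopB (ts : List String) (j : Nat) (n : Int) (d : PySem.Dict Int (List String))
    (hk : ∀ k ∈ d.keys, k < n) :
    (pvBChunks ts (j : Int) n d).items = d.items ++ boardsB (ts.drop j) n := by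
  by_cases hj : j < ts.length
  · have hnc : d.contains n = false := by
      rw [PySem.Dict.contains_eq_decide_mem_keys]
      simp only [decide_eq_false_iff_not]
      intro h; have := hk n h; omega
    have hitems := PySem.Dict.items_insert_of_not_contains d
      (v := PySem.List.slice ts (some (j : Int)) (some ((j : Int) + 5))) hnc
    have hk' : ∀ k ∈ (d.insert n (PySem.List.slice ts (some (j : Int)) (some ((j : Int) + 5)))).keys,
        k < n + 1 := by
      intro k hkm
      rcases (PySem.Dict.mem_keys_insert _ _ _ _).mp hkm with h | h
      · omega
      · have := hk k h; omega
    have hcast : ((j : Int) + 5) = ((j + 5 : Nat) : Int) := by push_cast; ring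
    rw [pvBChunks, if_pos (by exact_mod_cast hj)]
    rw [hcast] at hitems hk' ⊢
    have hrec := loopB ts (j + 5) (n + 1) _ hk'
    rw [hrec, hitems]
    have hslice : PySem.List.slice ts (some (j : Int)) (some ((j + 5 : Nat) : Int))
        = (ts.drop j).take 5 := by
      rw [PySem.List.slice_natCast]
      norm_num
    rw [hslice]
    rw [boardsB_ne (ts.drop j) n (by simp; omega)]
    simp [List.drop_drop]
  · rw [pvBChunks, if_neg (by exact_mod_cast hj)]
    rw [List.drop_eq_nil_of_le (by omega)]
    simp only [boardsB]
    simp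
termination_by ts.length - j
decreasing_by omega

lemma bridgeAB (ts cur : List String) (k : Int) (hne : cur ≠ []) (hlen : cur.length ≤ 5) :
    boardsA cur k ts = boardsB (cur ++ ts) k := by
  induction ts generalizing cur k with
  | nil =>
      rw [boardsA, List.append_nil, boardsB_ne cur k hne]
      rw [List.take_of_length_le hlen, List.drop_eq_nil_of_le hlen]
      simp only [boardsB]
  | cons x r ih =>
      by_cases h5 : cur.length = 5
      · rw [boardsA]
        simp only [if_pos h5]
        rw [ih [x] (k+1) (by simp) (by simp)]
        rw [boardsB_ne (cur ++ x :: r) k (by simp)]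
        rw [List.take_left' h5, List.drop_left' h5]
        simp
      · rw [boardsA]
        simp only [if_neg h5]
        rw [ih (cur ++ [x]) k (by simp) (by simp; omega)]
        simp

-- ===== VERDICT (by name: the statement is the Claim_ definition above) =====
theorem convert_to_bingo_dict_spec : Claim_equal_convert_to_bingo_dict := by
  intro bingo _
  unfold Spec_convert_to_bingo_dict convert_to_bingo_dict convert_to_bingo_dict_alt
  rw [foldl_pvAstep_filter, empty_insert_eq_mk]
  have hA : ((bingo.filter (fun x => x != "")).foldl pvAstep
      ((0:Int), 1, PySem.Dict.mk [((1:Int), ([]:List String))])).2.2.items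
      = boardsA [] 1 (bingo.filter (fun x => x != "")) := by
    have := loopA (bingo.filter (fun x => x != "")) [] [] 1
      (by intro x hx; simpa using (List.mem_filter.mp hx).2)
      (by simp) (by simp) (by simp)
    simpa using this
  rw [hA]
  cases hts : bingo.filter (fun x => x != "") with
  | nil =>
      rw [pvBChunks, if_neg (by norm_num)]
      simp only [boardsA]
  | cons x r =>
      rw [pvBChunks, if_pos (by simp)]
      have hc : (PySem.Dict.mk [((1:Int), ([]:List String))]).contains 1 = true := by decide
      have hins : (PySem.Dict.mk [((1:Int), ([]:List String))]).insert 1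
          (PySem.List.slice (x :: r) (some 0) (some (0 + 5)))
          = PySem.Dict.mk [(1, PySem.List.slice (x :: r) (some 0) (some (0 + 5)))] := by
        apply PySem.Dict.ext
        rw [PySem.Dict.items_insert_of_contains _ _ hc]
        rfl
      rw [hins]
      rw [show ((0:Int) + 5) = ((5 : Nat) : Int) by norm_num]
      rw [loopB (x :: r) 5 (1 + 1) _ (by intro k hk; simp [PySem.Dict.keys] at hk; omega)]
      have hslice : PySem.List.slice (x :: r) (some (0:Int)) (some ((5 : Nat) : Int))
          = (x :: r).take 5 := by
        rw [PySem.List.slice_zero_start, PySem.List.slice_to _ (by norm_num : (0:Int) ≤ (5:Nat))]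
        simp
      rw [hslice]
      have hb : boardsA [] 1 (x :: r) = boardsB (x :: r) 1 := by
        rw [boardsA]
        simp only [List.length_nil, if_neg (by norm_num : ¬ (0 = 5))]
        have := bridgeAB r [x] 1 (by simp) (by simp)
        simpa using this
      rw [hb, boardsB_ne (x :: r) 1 (by simp)]
      simp
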